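-- pv_equiv track=rewrite | github.com/neuralinterfacinglab/SpeechTargets | detect_speech_local.py | get_channel_indices
-- ===== SOURCE A (Python) =====
-- def get_channel_indices(channel_names, selected_channels, timeframes=5):
--     """
--     Get name of each channel and its indices
--
--     Parameters
--     ----------
--     channel_names: array (electrodes, label)
--         Channel names
--
--     Returns
--     ----------
--     channel_indices: dict (channel name, indices)
--         Channel names with corresponding indices
--     """
--     #multiply for timeframes
--     names = list(channel_names)*timeframes
--     #get channel information
--     channel_indices = {}
--     for i,chan in enumerate(names):
--         if chan in selected_channels:
--             if chan not in channel_indices: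
--                 channel_indices[chan] = [i]
--             else:
--                 channel_indices[chan].append(i)
--     return channel_indices
-- ===== SOURCE B (Python) =====
-- def get_channel_indices(channel_names, selected_channels, timeframes=5):
--     """Index the selected channels once over one block, then replicate
--     arithmetically per timeframe instead of scanning the repeated list."""
--     names = list(channel_names)
--     n = len(names)
--     if timeframes <= 0:
--         return {}
--     base = {}
--     for p, chan in enumerate(names):
--         if chan in selected_channels:
--             base.setdefault(chan, []).append(p)
--     return {chan: [p + t * n for t in range(timeframes) for p in positions]
--             for chan, positions in base.items()}
-- ===== Notes on version B (the rewrite author's own statement) =====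
-- stated objective: faster
-- what changed: B scans the channel list once to build a per-block position table and then generates each channel's indices arithmetically as p + t*n over the timeframes, instead of materializing the timeframes-times repeated name list and scanning it with a linear 'in selected_channels' membership test per element.
import Mathlib
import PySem

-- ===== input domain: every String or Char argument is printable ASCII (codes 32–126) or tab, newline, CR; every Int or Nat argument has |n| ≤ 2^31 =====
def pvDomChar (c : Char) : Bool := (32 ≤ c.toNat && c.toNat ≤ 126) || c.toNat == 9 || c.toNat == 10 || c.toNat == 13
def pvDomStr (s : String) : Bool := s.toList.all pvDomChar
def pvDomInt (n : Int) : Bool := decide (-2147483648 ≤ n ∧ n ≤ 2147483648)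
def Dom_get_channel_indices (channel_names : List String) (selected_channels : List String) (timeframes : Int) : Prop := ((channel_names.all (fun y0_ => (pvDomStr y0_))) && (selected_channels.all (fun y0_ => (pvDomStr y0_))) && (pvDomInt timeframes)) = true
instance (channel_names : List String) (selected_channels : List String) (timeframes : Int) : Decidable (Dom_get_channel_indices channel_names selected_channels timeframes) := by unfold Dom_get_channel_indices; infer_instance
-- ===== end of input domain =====

-- B indexes the selected channels once over a single block of channel_names and replicates the
-- index lists arithmetically per timeframe, instead of scanning the timeframes-times repeated list.

-- ===== PORT A =====
-- Python's 'list * int' (n concatenated copies; empty for n <= 0), computed by doubling so it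
-- evaluates on the whole domain; pvRepeat_eq (below) shows it IS flatten (replicate n xs).
def pvRepeat {α : Type} (xs : List α) (n : Nat) : List α :=
  if n = 0 then []
  else
    let h := pvRepeat xs (n / 2)
    if n % 2 = 0 then h ++ h else xs ++ (h ++ h)

def get_channel_indices (channel_names : List String) (selected_channels : List String) (timeframes : Int) : List (String × List Int) :=
  -- names = list(channel_names)*timeframes  (Python list*int: empty for timeframes <= 0)
  let names := pvRepeat channel_names timeframes.toNat
  -- 'for i, chan in enumerate(names)': a foldl carrying the running index i
  ((names.foldl
    (fun st chan =>
      (if selected_channels.contains chan then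
         if !(st.1.contains chan) then st.1.insert chan [st.2]
         else st.1.modify chan [] (fun l => l ++ [st.2])
       else st.1,
       st.2 + 1))
    (PySem.Dict.empty, (0 : Int))).1).items

-- ===== PORT B =====
def get_channel_indices_alt (channel_names : List String) (selected_channels : List String) (timeframes : Int) : List (String × List Int) :=
  let n : Int := channel_names.length
  if timeframes ≤ 0 then []
  else
  -- 'for p, chan in enumerate(names)': a foldl carrying the running position p
  let base := (channel_names.foldl
    (fun st chan =>
      (if selected_channels.contains chan then st.1.modify chan [] (fun l => l ++ [st.2]) else st.1,
       st.2 + 1))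
    (PySem.Dict.empty, (0 : Int))).1
  base.items.map (fun kv =>
    (kv.1, (List.range timeframes.toNat).flatMap (fun (t : Nat) => kv.2.map (fun p => p + (t : Int) * n))))

-- ===== PRECONDITION & SPEC =====
def Spec_get_channel_indices (channel_names : List String) (selected_channels : List String) (timeframes : Int) (out : List (String × List Int)) : Prop := out = get_channel_indices_alt channel_names selected_channels timeframes
instance (channel_names : List String) (selected_channels : List String) (timeframes : Int) (out : List (String × List Int)) : Decidable (Spec_get_channel_indices channel_names selected_channels timeframes out) := by unfold Spec_get_channel_indices; infer_instance

-- ===== CLAIM (what is proved, stated in full; the proofs are below) =====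
def Claim_equal_get_channel_indices : Prop := ∀ (channel_names : List String) (selected_channels : List String) (timeframes : Int), Dom_get_channel_indices channel_names selected_channels timeframes → Spec_get_channel_indices channel_names selected_channels timeframes (get_channel_indices channel_names selected_channels timeframes)

-- ===== LEMMAS AND PROOFS =====

theorem pv_foldl_counter {β : Type} (g : β → Int → String → β) (xs : List String) (d : β) (s : Int) :
    xs.foldl (fun st x => (g st.1 st.2 x, st.2 + 1)) (d, s)
      = ((PySem.List.enumerate xs s).foldl (fun d p => g d p.1 p.2) d, s + xs.length) := by
  induction xs generalizing d s with
  | nil => simp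
  | cons x t ih =>
    simp only [List.foldl_cons, PySem.List.enumerate_cons, ih, List.length_cons]
    congr 1
    push_cast; ring

theorem pvRepeat_eq {α : Type} (xs : List α) (n : Nat) :
    pvRepeat xs n = (List.replicate n xs).flatten := by
  induction n using Nat.strong_induction_on with
  | _ n ih =>
    rw [pvRepeat]
    rcases Nat.eq_zero_or_pos n with h0 | h0
    · simp [h0]
    · rw [if_neg (by omega)]
      have hh := ih (n / 2) (by omega)
      have hsplit : ∀ a b : Nat, (List.replicate (a + b) xs).flatten
          = (List.replicate a xs).flatten ++ (List.replicate b xs).flatten := by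
        intro a b; rw [List.replicate_add, List.flatten_append]
      rcases Nat.even_or_odd n with ⟨k, hk⟩ | ⟨k, hk⟩
      · have h2 : n % 2 = 0 := by omega
        have hq : n / 2 = k := by omega
        rw [if_pos h2, hh, hq, (by omega : n = k + k), hsplit]
      · have h2 : ¬ n % 2 = 0 := by omega
        have hq : n / 2 = k := by omega
        rw [if_neg h2, hh, hq, (by omega : n = 1 + (k + k)), hsplit, hsplit]
        simp

-- a fold that skips elements failing p is a fold over the filtered list
theorem pv_foldl_if {α β : Type} (p : α → Bool) (g : β → α → β) (l : List α) (init : β) :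
    l.foldl (fun d x => if p x then g d x else d) init = (l.filter p).foldl g init := by
  induction l generalizing init with
  | nil => rfl
  | cons a t ih => simp only [List.foldl_cons, List.filter_cons]; split <;> simp [ih]

theorem pv_modify_eq_insert (d : PySem.Dict String (List Int)) (k : String) (f : List Int → List Int) :
    d.modify k [] f = d.insert k (f (d.getD k [])) :=
  PySem.Dict.ext_iff.mpr rfl

-- A's two branches are one dict "append to the group" update
theorem pv_stepA_eq (d : PySem.Dict String (List Int)) (p : Int × String) :
    (if !(d.contains p.2) then d.insert p.2 [p.1] else d.modify p.2 [] (fun l => l ++ [p.1]))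
      = d.modify p.2 [] (fun l => l ++ [p.1]) := by
  cases h : d.contains p.2 with
  | false => simp [pv_modify_eq_insert, PySem.Dict.getD_of_not_contains d [] h]
  | true => simp

-- the canonical grouping fold, written with the key in the second component
def pvF (l : List (Int × String)) : PySem.Dict String (List Int) :=
  l.foldl (fun d p => d.modify p.2 [] (fun v => v ++ [p.1])) PySem.Dict.empty

theorem pv_filter_map_snd (l : List (Int × String)) (q : String → Bool) :
    (l.filter (fun p => q p.2)).map (·.2) = (l.map (·.2)).filter q := by
  induction l with
  | nil => rfl
  | cons a t ih => simp only [List.filter_cons, List.map_cons]; split <;> simp_all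

theorem pvF_keys (l : List (Int × String)) :
    (pvF l).keys = PySem.Set.ofList (l.map (·.2)) := by
  unfold pvF
  rw [PySem.Dict.keys_foldl_modify_key (key := fun p : Int × String => p.2)
        (f := fun _ p => fun v => v ++ [p.1])]
  simp [PySem.Set.update_nil_left]

theorem pvF_nodup (l : List (Int × String)) : (pvF l).keys.Nodup := by
  unfold pvF
  exact PySem.Dict.nodup_keys_foldl_modify_key l (fun p => p.2) []
    (fun _ p => fun v => v ++ [p.1]) PySem.Dict.empty (by simp)

theorem pv_swap_filter_map (l : List (Int × String)) (c : String) :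
    ((l.map Prod.swap).filter (fun p => p.1 == c)).map (·.2)
      = (l.filter (fun p => p.2 == c)).map (·.1) := by
  induction l with
  | nil => rfl
  | cons a t ih => simp only [List.map_cons, List.filter_cons, Prod.fst_swap]; split <;> simp_all

theorem pvF_getD (l : List (Int × String)) (c : String) :
    (pvF l).getD c [] = (l.filter (fun p => p.2 == c)).map (·.1) := by
  have h1 : pvF l = (l.map Prod.swap).foldl (fun d q => d.modify q.1 [] (fun v => v ++ [q.2])) PySem.Dict.empty := by
    rw [List.foldl_map]; rfl
  rw [h1, PySem.Dict.getD_foldl_modify_append, pv_swap_filter_map]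
  simp

-- indices of the occurrences of c in xs, enumerated from s
def pvE (c : String) (xs : List String) (s : Int) : List Int :=
  ((PySem.List.enumerate xs s).filter (fun p => p.2 == c)).map (·.1)

theorem pvE_cons (c x : String) (xs : List String) (s : Int) :
    pvE c (x :: xs) s = (if x == c then [s] else []) ++ pvE c xs (s+1) := by
  simp only [pvE, PySem.List.enumerate_cons, List.filter_cons]
  split <;> simp_all

theorem pvE_shift (c : String) (xs : List String) (s : Int) :
    pvE c xs s = (pvE c xs 0).map (· + s) := by
  induction xs generalizing s with
  | nil => simp [pvE]
  | cons x t ih =>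
    rw [pvE_cons, pvE_cons, ih (s+1), ih (0+1)]
    simp only [List.map_append, List.map_map]
    congr 1
    · split <;> simp
    · congr 1; funext p; simp [Function.comp]; ring

theorem pvE_append (c : String) (xs ys : List String) (s : Int) :
    pvE c (xs ++ ys) s = pvE c xs s ++ pvE c ys (s + xs.length) := by
  simp [pvE, PySem.List.enumerate_append]

theorem pvE_replicate (c : String) (cn : List String) (m : Nat) (s : Int) :
    pvE c (List.flatten (List.replicate m cn)) s
      = (List.range m).flatMap (fun (t : Nat) => (pvE c cn 0).map (fun p => p + (s + (t : Int) * cn.length))) := by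
  induction m generalizing s with
  | zero => simp [pvE]
  | succ k ih =>
    rw [List.replicate_succ, List.flatten_cons, pvE_append, ih, pvE_shift,
        List.range_succ_eq_map]
    simp only [List.flatMap_cons, List.flatMap_map]
    congr 1
    · congr 1; funext p; push_cast; ring
    · congr 1; funext t; congr 1; funext p; push_cast; ring

theorem pv_ofList_replicate (m : Nat) (hm : 1 ≤ m) (ys : List String) :
    PySem.Set.ofList ((List.replicate m ys).flatten) = PySem.Set.ofList ys := by
  obtain ⟨k, rfl⟩ : ∃ k, m = k + 1 := ⟨m - 1, by omega⟩
  rw [List.replicate_succ, List.flatten_cons, PySem.Set.ofList_append,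
      PySem.Set.update_eq_append_filter]
  have h : ∀ x ∈ PySem.Set.ofList (List.replicate k ys).flatten, x ∈ ys := by
    intro x hx
    rw [PySem.Set.mem_ofList, List.mem_flatten] at hx
    obtain ⟨l, hl, hxl⟩ := hx
    rwa [List.eq_of_mem_replicate hl] at hxl
  have hnil : (PySem.Set.ofList (List.replicate k ys).flatten).filter
      (fun y => !(PySem.Set.contains (PySem.Set.ofList ys) y)) = [] := by
    rw [List.filter_eq_nil_iff]
    intro x hx
    simp [PySem.Set.mem_ofList]
    exact h x hx
  rw [hnil, List.append_nil]

theorem pv_double_filter (l : List (Int × String)) (sel : List String) (c : String) (hc : sel.contains c = true) :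
    (l.filter (fun p => sel.contains p.2)).filter (fun p => p.2 == c) = l.filter (fun p => p.2 == c) := by
  rw [List.filter_filter]
  apply List.filter_congr
  intro x _
  cases hx : (x.2 == c) with
  | false => simp
  | true =>
    have hxc := eq_of_beq hx
    have hcm : c ∈ sel := by simpa using hc
    simp [hxc, hcm]

theorem pv_value_eq (c : String) (cn : List String) (tf : Int) :
    pvE c ((List.replicate tf.toNat cn).flatten) 0
      = (List.range tf.toNat).flatMap (fun (t : Nat) => (pvE c cn 0).map (fun p => p + (t : Int) * cn.length)) := by
  rw [pvE_replicate]
  congr 1; funext t; congr 1; funext p; ring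

-- ===== VERDICT (by name: the statement is the Claim_ definition above) =====
theorem get_channel_indices_spec : Claim_equal_get_channel_indices := by
  intro cn sel tf _
  unfold Spec_get_channel_indices get_channel_indices get_channel_indices_alt
  simp only [pvRepeat_eq]
  by_cases htf : tf ≤ 0
  · have h0 : tf.toNat = 0 := by omega
    simp [htf, h0, PySem.Dict.empty]
  · have hm : 1 ≤ tf.toNat := by omega
    rw [if_neg htf]
    simp only [pv_foldl_counter (g := fun (d : PySem.Dict String (List Int)) i chan =>
          if sel.contains chan then
            if !(d.contains chan) then d.insert chan [i]
            else d.modify chan [] (fun l => l ++ [i])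
          else d),
        pv_foldl_counter (g := fun (d : PySem.Dict String (List Int)) i chan =>
          if sel.contains chan then d.modify chan [] (fun l => l ++ [i]) else d)]
    have hA : ((PySem.List.enumerate ((List.replicate tf.toNat cn).flatten)).foldl
        (fun d p =>
          if sel.contains p.2 then
            if !(d.contains p.2) then d.insert p.2 [p.1]
            else d.modify p.2 [] (fun l => l ++ [p.1])
          else d)
        PySem.Dict.empty)
        = pvF ((PySem.List.enumerate ((List.replicate tf.toNat cn).flatten)).filter
            (fun p => sel.contains p.2)) := by
      simp only [pv_stepA_eq]
      rw [pv_foldl_if]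
      rfl
    have hB : ((PySem.List.enumerate cn).foldl
        (fun d p =>
          if sel.contains p.2 then d.modify p.2 [] (fun l => l ++ [p.1]) else d)
        PySem.Dict.empty)
        = pvF ((PySem.List.enumerate cn).filter (fun p => sel.contains p.2)) := by
      rw [pv_foldl_if]
      rfl
    simp only [hA, hB]
    rw [PySem.Dict.items_eq_map_keys _ (pvF_nodup _) ([] : List Int),
        PySem.Dict.items_eq_map_keys _ (pvF_nodup _) ([] : List Int), List.map_map]
    have hK : (pvF ((PySem.List.enumerate ((List.replicate tf.toNat cn).flatten)).filter
          (fun p => sel.contains p.2))).keys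
        = (pvF ((PySem.List.enumerate cn).filter (fun p => sel.contains p.2))).keys := by
      rw [pvF_keys, pvF_keys, pv_filter_map_snd, pv_filter_map_snd,
          PySem.List.map_snd_enumerate, PySem.List.map_snd_enumerate,
          List.filter_flatten, List.map_replicate, pv_ofList_replicate _ hm]
    rw [hK]
    apply List.map_congr_left
    intro c hc
    have hcm : sel.contains c = true := by
      rw [pvF_keys, pv_filter_map_snd, PySem.List.map_snd_enumerate,
          PySem.Set.mem_ofList, List.mem_filter] at hc
      exact hc.2
    simp only [Function.comp_apply]
    rw [pvF_getD, pvF_getD, pv_double_filter _ _ _ hcm, pv_double_filter _ _ _ hcm]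
    have hv := pv_value_eq c cn tf
    simp only [pvE] at hv
    rw [hv]
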